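-- pv_equiv track=rewrite | github.com/oden73/BSUIR | sem4/AOIS/LW3/karnaugh_method/karnaugh_for_5_args.py | fix_index_list
-- ===== SOURCE A (Python) =====
-- def fix_index_list(index_list: list[tuple], start_or_end: bool):
--     degrees = [1, 2, 4, 8, 16, 32]
--     while len(index_list) not in degrees:
--         if start_or_end:
--             index_list.pop(0)
--         else:
--             index_list.pop(len(index_list) - 1)
--     return index_list
-- ===== SOURCE B (Python) =====
-- def fix_index_list(index_list, start_or_end):
--     # Closed form: keep the largest power-of-two (capped at 32) prefix/suffix.
--     # Note: A mutates the argument in place; B only computes the return value.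
--     n = len(index_list)
--     d = 1 << min(5, max(n.bit_length() - 1, 0))
--     return index_list[n - d:] if start_or_end else index_list[:d]
-- ===== Notes on version B (the rewrite author's own statement) =====
-- stated objective: simpler
-- what changed: Replaces the element-by-element pop loop with a closed-form computation of the largest power of two <= len (capped at 32) and a single slice from the correct end.
import Mathlib
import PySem

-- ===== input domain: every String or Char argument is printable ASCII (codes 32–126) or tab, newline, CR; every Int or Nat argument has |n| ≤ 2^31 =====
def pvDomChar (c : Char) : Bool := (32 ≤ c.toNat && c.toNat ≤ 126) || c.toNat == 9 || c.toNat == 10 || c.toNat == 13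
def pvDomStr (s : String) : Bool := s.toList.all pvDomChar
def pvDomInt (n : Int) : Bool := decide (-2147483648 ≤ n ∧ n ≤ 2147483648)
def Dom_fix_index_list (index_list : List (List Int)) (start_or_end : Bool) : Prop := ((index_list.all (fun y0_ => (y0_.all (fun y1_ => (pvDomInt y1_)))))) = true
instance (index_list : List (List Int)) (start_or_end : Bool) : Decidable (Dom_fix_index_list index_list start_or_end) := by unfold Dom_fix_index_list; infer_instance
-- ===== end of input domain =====

-- B replaces A's pop-one-element-at-a-time loop by a closed-form size (largest power of two
-- ≤ len, capped at 32) and one slice; A mutates its argument in place, B does not — the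
-- equivalence proved here is about the return value.

-- ===== PORT A =====
-- while len not in degrees: pop(0) / pop(len-1); pop on the empty list raises IndexError,
-- so the [] branch below is unreachable inside Pre_.
def fix_index_list (index_list : List (List Int)) (start_or_end : Bool) : List (List Int) :=
  if index_list.length ∈ ([1, 2, 4, 8, 16, 32] : List Nat) then index_list
  else
    match index_list with
    | [] => []  -- Python raises IndexError here; excluded by Pre_
    | x :: xs =>
      fix_index_list (if start_or_end then xs else (x :: xs).dropLast) start_or_end
termination_by index_list.length
decreasing_by
  split <;> simp

-- ===== PORT B =====
-- d = 1 << min(5, max(n.bit_length() - 1, 0));  for every n : Nat,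
-- max(bit_length(n) - 1, 0) = Nat.log2 n (both are 0 at n = 0), so this is exact.
def fix_index_list_alt (index_list : List (List Int)) (start_or_end : Bool) : List (List Int) :=
  let n := index_list.length
  let d : Nat := 2 ^ min 5 (Nat.log2 n)
  if start_or_end then
    PySem.List.slice index_list (some ((n : Int) - (d : Int))) none
  else
    PySem.List.slice index_list none (some (d : Int))

-- ===== PRECONDITION & SPEC =====
-- Pre_ excludes only the empty list, on which A raises IndexError (pop from an empty list);
-- B returns [] there.
def Pre_fix_index_list (index_list : List (List Int)) (start_or_end : Bool) : Prop :=
  index_list ≠ []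
instance (index_list : List (List Int)) (start_or_end : Bool) : Decidable (Pre_fix_index_list index_list start_or_end) := by unfold Pre_fix_index_list; infer_instance

def pvWitness_fix_index_list : List (List Int) × Bool := ([[0], [1], [2]], true)

def Spec_fix_index_list (index_list : List (List Int)) (start_or_end : Bool) (out : List (List Int)) : Prop := out = fix_index_list_alt index_list start_or_end
instance (index_list : List (List Int)) (start_or_end : Bool) (out : List (List Int)) : Decidable (Spec_fix_index_list index_list start_or_end out) := by unfold Spec_fix_index_list; infer_instance

-- ===== CLAIM (what is proved, stated in full; the proofs are below) =====
def Claim_equal_fix_index_list : Prop := ∀ (index_list : List (List Int)) (start_or_end : Bool), Dom_fix_index_list index_list start_or_end → Pre_fix_index_list index_list start_or_end → Spec_fix_index_list index_list start_or_end (fix_index_list index_list start_or_end)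
-- ===== LEMMAS AND PROOFS =====

/-- The closed-form kept size. -/
def pow2cap (n : Nat) : Nat := 2 ^ min 5 (Nat.log2 n)

theorem pow2cap_le {n : Nat} (h : 1 ≤ n) : pow2cap n ≤ n := by
  calc pow2cap n ≤ 2 ^ Nat.log2 n := Nat.pow_le_pow_right (by norm_num) (min_le_right _ _)
    _ ≤ n := Nat.log2_self_le (by omega)

theorem log2_mono {m n : Nat} (h : m ≤ n) : Nat.log2 m ≤ Nat.log2 n := by
  rcases Nat.eq_zero_or_pos m with h0 | h1
  · simp [h0, Nat.log2]
  · exact (Nat.le_log2 (by omega)).2 (le_trans (Nat.log2_self_le (by omega)) h)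

theorem pow2cap_eq_iff_mem {n : Nat} (h : 1 ≤ n) :
    n ∈ ([1, 2, 4, 8, 16, 32] : List Nat) ↔ pow2cap n = n := by
  constructor
  · intro hm
    fin_cases hm <;> decide
  · intro he
    unfold pow2cap at he
    have hk : min 5 (Nat.log2 n) ≤ 5 := min_le_left _ _
    set k := min 5 (Nat.log2 n) with hkdef
    clear_value k
    interval_cases k <;> simp [← he]

theorem pow2cap_pred {n : Nat} (h : 1 ≤ n)
    (hne : n ∉ ([1, 2, 4, 8, 16, 32] : List Nat)) : pow2cap (n - 1) = pow2cap n := by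
  have hlt : pow2cap n < n :=
    lt_of_le_of_ne (pow2cap_le h) (fun he => hne ((pow2cap_eq_iff_mem h).2 he))
  have hpos : 1 ≤ pow2cap n := Nat.one_le_two_pow
  have hle : pow2cap n ≤ n - 1 := by omega
  have hlog : min 5 (Nat.log2 n) ≤ Nat.log2 (n - 1) := (Nat.le_log2 (by omega)).2 hle
  have hmono : Nat.log2 (n - 1) ≤ Nat.log2 n := log2_mono (by omega)
  unfold pow2cap
  congr 1
  omega

/-- B's port in drop/take form (for nonempty lists). -/
theorem alt_eq {l : List (List Int)} (h : l ≠ []) (s : Bool) :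
    fix_index_list_alt l s =
      if s then l.drop (l.length - pow2cap l.length) else l.take (pow2cap l.length) := by
  have hlen : 1 ≤ l.length := List.length_pos_iff.2 h
  have hd : pow2cap l.length ≤ l.length := pow2cap_le hlen
  unfold pow2cap at hd
  unfold fix_index_list_alt pow2cap
  cases s
  · rw [if_neg Bool.false_ne_true, if_neg Bool.false_ne_true,
      PySem.List.slice_to_natCast]
  · rw [if_pos rfl, if_pos rfl,
      PySem.List.slice_from _ (by omega)]
    congr 1
    omega

theorem fix_eq_alt : ∀ (n : Nat) (l : List (List Int)) (s : Bool), l.length = n → l ≠ [] →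
    fix_index_list l s = fix_index_list_alt l s := by
  intro n
  induction n using Nat.strong_induction_on with
  | _ n ih =>
    intro l s hn hne
    have hlen : 1 ≤ l.length := List.length_pos_iff.2 hne
    rw [alt_eq hne s]
    by_cases hmem : l.length ∈ ([1, 2, 4, 8, 16, 32] : List Nat)
    · rw [fix_index_list.eq_def, if_pos hmem]
      have : pow2cap l.length = l.length := (pow2cap_eq_iff_mem hlen).1 hmem
      cases s <;> simp [this]
    · -- not a degree: length ≥ 2 (1 is a degree), pop one element and recurse
      have h2 : 2 ≤ l.length := by
        by_contra hlt
        push_neg at hlt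
        have h1 : l.length = 1 := by omega
        exact hmem (by simp [h1])
      obtain ⟨x, xs, rfl⟩ := List.exists_cons_of_ne_nil hne
      rw [fix_index_list.eq_def, if_neg hmem]
      show fix_index_list (if s = true then xs else (x :: xs).dropLast) s = _
      set l := x :: xs with hl
      set l' := if s then xs else l.dropLast with hl'
      have hlen' : l'.length = l.length - 1 := by
        cases s <;> simp [hl', hl]
      have hne' : l' ≠ [] := by
        have h1 : 1 ≤ l'.length := by omega
        exact List.length_pos_iff.1 h1
      have hrec := ih (l.length - 1) (by omega) l' s (by omega) hne'
      have hcap : pow2cap l'.length = pow2cap l.length := by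
        rw [hlen']; exact pow2cap_pred hlen hmem
      have hdle : pow2cap l.length ≤ l.length - 1 := by
        have hlt : pow2cap l.length < l.length :=
          lt_of_le_of_ne (pow2cap_le hlen) (fun he => hmem ((pow2cap_eq_iff_mem hlen).2 he))
        omega
      rw [hrec, alt_eq hne' s, hcap, hlen']
      cases s
      · -- pop from the end: dropLast.take d = l.take d
        rw [if_neg Bool.false_ne_true, if_neg Bool.false_ne_true, hl',
          if_neg Bool.false_ne_true, List.dropLast_eq_take, List.take_take]
        congr 1
        omega
      · -- pop from the front: tail.drop (len-1-d) = l.drop (len-d)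
        rw [if_pos rfl, if_pos rfl, hl', if_pos rfl]
        have hxs : xs = l.tail := by simp [hl]
        rw [hxs, List.drop_tail]
        congr 1
        omega

-- ===== VERDICT (by name: the statement is the Claim_ definition above) =====
theorem fix_index_list_spec : Claim_equal_fix_index_list := by
  intro l s _ hpre
  unfold Spec_fix_index_list
  exact (fix_eq_alt l.length l s rfl hpre)
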